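-- pv_equiv track=rewrite | github.com/Atlante45/Advent-of-Code | solutions/y2024/d06.py | parse
-- ===== SOURCE A (Python) =====
-- from collections import defaultdict
--
-- def parse(data):
--     lines = data.splitlines()
--
--     size = len(lines), len(lines[0])
--     start = None
--     obstacles = set()
--
--     col_obstacles = defaultdict(list)
--     row_obstacles = defaultdict(list)
--
--     for i, line in enumerate(lines):
--         for j, c in enumerate(line):
--             if c == '#':
--                 obstacles.add((i, j))
--                 col_obstacles[j].append(i)
--                 row_obstacles[i].append(j)
--             elif c == '^':
--                 start = (i, j)
--
--     for col in col_obstacles: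
--         col_obstacles[col].sort()
--     for row in row_obstacles:
--         row_obstacles[row].sort()
--
--
--     return start, size, obstacles, col_obstacles, row_obstacles
-- ===== SOURCE B (Python) =====
-- from collections import defaultdict
--
--
-- def parse(data):
--     lines = data.splitlines()
--     size = len(lines), len(lines[0])
--
--     # one dict-building pass: each row's sorted '#' columns, assigned whole
--     row_obstacles = defaultdict(list)
--     for i, line in enumerate(lines):
--         js = [j for j, c in enumerate(line) if c == '#']
--         if js:
--             row_obstacles[i] = js
--
--     # last '^' in row-major order
--     starts = [(i, j) for i, line in enumerate(lines)
--               for j, c in enumerate(line) if c == '^']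
--     start = starts[-1] if starts else None
--
--     # derive obstacles and the column index from the row index
--     cells = [(i, j) for i, js in row_obstacles.items() for j in js]
--     obstacles = set(cells)
--     col_obstacles = defaultdict(list)
--     for i, j in cells:
--         col_obstacles[j].append(i)
--
--     return start, size, obstacles, col_obstacles, row_obstacles
-- ===== Notes on version B (the rewrite author's own statement) =====
-- stated objective: alternative
-- what changed: A interleaves all five results in one nested character loop with a 4-part mutable state and then re-sorts every dict value; B builds row_obstacles per line by whole-list comprehension assignment, takes the start as the last element of a comprehension of '^' positions, and derives obstacles and col_obstacles from the already-grouped row index, with no sort calls at all.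
import Mathlib
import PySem

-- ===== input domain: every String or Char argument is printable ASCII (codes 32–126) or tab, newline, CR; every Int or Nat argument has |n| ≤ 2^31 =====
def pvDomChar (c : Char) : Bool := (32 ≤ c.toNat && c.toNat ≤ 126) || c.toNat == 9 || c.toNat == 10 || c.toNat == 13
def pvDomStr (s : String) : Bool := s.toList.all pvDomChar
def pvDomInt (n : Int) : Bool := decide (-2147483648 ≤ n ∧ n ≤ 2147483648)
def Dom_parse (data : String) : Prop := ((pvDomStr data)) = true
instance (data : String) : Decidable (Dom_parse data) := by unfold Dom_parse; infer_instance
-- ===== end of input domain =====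

-- B is an alternative decomposition of the same parse (no claim of speed): A's single nested
-- character loop with a 4-part state plus a re-sorting pass becomes per-line comprehensions,
-- a last-of-list start, and the column index derived from the row index, with no sorting.

-- ===== PORT A =====
def parse (data : String) : (Option (Int × Int)) × (Int × Int) × (List (Int × Int)) × (List (Int × List Int)) × (List (Int × List Int)) :=
  let lines := PySem.Str.splitlines data
  match lines with
  | [] => (none, (0, 0), [], [], [])  -- `len(lines[0])` raises IndexError here; excluded by Pre_parse
  | line0 :: _ =>
    let size : Int × Int := ((lines.length : Int), (PySem.Str.len line0 : Int))
    let st := (PySem.List.enumerate lines).foldl (fun s il =>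
        (PySem.List.enumerate il.2.toList).foldl (fun t jc =>
          if jc.2 == '#' then
            (t.1, PySem.Set.add t.2.1 (il.1, jc.1),
              PySem.Dict.modify t.2.2.1 jc.1 [] (fun v => v ++ [il.1]),
              PySem.Dict.modify t.2.2.2 il.1 [] (fun v => v ++ [jc.1]))
          else if jc.2 == '^' then
            (some (il.1, jc.1), t.2)
          else t) s)
      ((none, PySem.Set.empty, PySem.Dict.empty, PySem.Dict.empty) :
        Option (Int × Int) × PySem.Set (Int × Int) × PySem.Dict Int (List Int) × PySem.Dict Int (List Int))
    let col := st.2.2.1.keys.foldl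
      (fun d k => PySem.Dict.modify d k [] (fun v => PySem.List.sorted v (fun x => x) false)) st.2.2.1
    let row := st.2.2.2.keys.foldl
      (fun d k => PySem.Dict.modify d k [] (fun v => PySem.List.sorted v (fun x => x) false)) st.2.2.2
    (st.1, size, st.2.1, col.items, row.items)

-- ===== PORT B =====
def parse_alt (data : String) : (Option (Int × Int)) × (Int × Int) × (List (Int × Int)) × (List (Int × List Int)) × (List (Int × List Int)) :=
  let lines := PySem.Str.splitlines data
  match lines with
  | [] => (none, (0, 0), [], [], [])  -- `len(lines[0])` raises IndexError here; excluded by Pre_parse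
  | line0 :: _ =>
    let size : Int × Int := ((lines.length : Int), (PySem.Str.len line0 : Int))
    let rowD := (PySem.List.enumerate lines).foldl (fun d il =>
        let js := ((PySem.List.enumerate il.2.toList).filter (fun jc => jc.2 == '#')).map (fun jc => jc.1)
        if js ≠ [] then d.insert il.1 js else d) PySem.Dict.empty
    let starts := (PySem.List.enumerate lines).flatMap (fun il =>
        ((PySem.List.enumerate il.2.toList).filter (fun jc => jc.2 == '^')).map (fun jc => (il.1, jc.1)))
    -- starts[-1] if starts else None; the guard makes pyGet? return `some`
    let start := if starts ≠ [] then PySem.List.pyGet? starts (-1) else none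
    let cells := rowD.items.flatMap (fun p => p.2.map (fun j => (p.1, j)))
    let obstacles := PySem.Set.ofList cells
    let colD := cells.foldl (fun d ij => PySem.Dict.modify d ij.2 [] (fun v => v ++ [ij.1])) PySem.Dict.empty
    (start, size, obstacles, colD.items, rowD.items)

-- ===== PRECONDITION & SPEC =====
-- On data = "" (the only input with data.toList = []) Python's `lines[0]` raises IndexError in
-- both A and B; Pre_parse excludes exactly that input.
def Pre_parse (data : String) : Prop := data.toList ≠ []
instance (data : String) : Decidable (Pre_parse data) := by unfold Pre_parse; infer_instance
def pvWitness_parse : String := ".#.\n^.#"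
def pvDecQuad : DecidableEq ((Int × Int) × (List (Int × Int)) × (List (Int × List Int)) × (List (Int × List Int))) :=
  fun a b => instDecidableEqProd a b
def pvDecOut : DecidableEq ((Option (Int × Int)) × (Int × Int) × (List (Int × Int)) × (List (Int × List Int)) × (List (Int × List Int))) :=
  fun a b => @instDecidableEqProd _ _ _ pvDecQuad a b
def Spec_parse (data : String) (out : (Option (Int × Int)) × (Int × Int) × (List (Int × Int)) × (List (Int × List Int)) × (List (Int × List Int))) : Prop := out = parse_alt data
instance (data : String) (out : (Option (Int × Int)) × (Int × Int) × (List (Int × Int)) × (List (Int × List Int)) × (List (Int × List Int))) : Decidable (Spec_parse data out) := by unfold Spec_parse; exact pvDecOut out (parse_alt data)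

-- ===== CLAIM (what is proved, stated in full; the proofs are below) =====
def Claim_equal_parse : Prop := ∀ (data : String), Dom_parse data → Pre_parse data → Spec_parse data (parse data)

-- ===== LEMMAS AND PROOFS =====

-- splitlines of a nonempty string is nonempty
theorem pv_go_ne (isB : Char → Bool) (cs cur : List Char) (acc : List (List Char)) :
    cs ≠ [] ∨ cur ≠ [] ∨ acc ≠ [] → PySem.Chars.splitlines.go isB cs cur acc ≠ [] := by
  fun_induction PySem.Chars.splitlines.go <;> intro h <;> simp_all

theorem pv_splitlines_ne_nil (s : String) (h : s.toList ≠ []) : PySem.Str.splitlines s ≠ [] := by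
  simp only [PySem.Str.splitlines, ne_eq, List.map_eq_nil_iff]
  exact pv_go_ne _ _ _ _ (Or.inl h)

-- component step functions of A's inner loop
def fS (i : Int) (st : Option (Int × Int)) (jc : Int × Char) : Option (Int × Int) :=
  if jc.2 == '^' then some (i, jc.1) else st
def fO (i : Int) (ob : PySem.Set (Int × Int)) (jc : Int × Char) : PySem.Set (Int × Int) :=
  if jc.2 == '#' then PySem.Set.add ob (i, jc.1) else ob
def fC (i : Int) (co : PySem.Dict Int (List Int)) (jc : Int × Char) : PySem.Dict Int (List Int) :=
  if jc.2 == '#' then co.modify jc.1 [] (fun v => v ++ [i]) else co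
def fR (i : Int) (ro : PySem.Dict Int (List Int)) (jc : Int × Char) : PySem.Dict Int (List Int) :=
  if jc.2 == '#' then ro.modify i [] (fun v => v ++ [jc.1]) else ro

theorem inner_split (i : Int) (cs : List (Int × Char))
    (s : Option (Int × Int) × PySem.Set (Int × Int) × PySem.Dict Int (List Int) × PySem.Dict Int (List Int)) :
    cs.foldl (fun t jc =>
      if jc.2 == '#' then
        (t.1, PySem.Set.add t.2.1 (i, jc.1),
          PySem.Dict.modify t.2.2.1 jc.1 [] (fun v => v ++ [i]),
          PySem.Dict.modify t.2.2.2 i [] (fun v => v ++ [jc.1]))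
      else if jc.2 == '^' then
        (some (i, jc.1), t.2)
      else t) s
    = (cs.foldl (fS i) s.1, cs.foldl (fO i) s.2.1, cs.foldl (fC i) s.2.2.1, cs.foldl (fR i) s.2.2.2) := by
  induction cs generalizing s with
  | nil => rfl
  | cons a t ih =>
    simp only [List.foldl_cons, ih]
    by_cases h1 : a.2 == '#'
    · have h2 : (a.2 == '^') = false := by
        simp only [beq_iff_eq] at h1; simp [h1]
      simp [fS, fO, fC, fR, h1, h2]
    · by_cases h2 : a.2 == '^' <;> simp [fS, fO, fC, fR, h1, h2]

theorem foldl_prod4 {β σ₁ σ₂ σ₃ σ₄ : Type} (f1 : σ₁ → β → σ₁) (f2 : σ₂ → β → σ₂)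
    (f3 : σ₃ → β → σ₃) (f4 : σ₄ → β → σ₄) (l : List β) (a : σ₁) (b : σ₂) (c : σ₃) (d : σ₄) :
    l.foldl (fun s e => (f1 s.1 e, f2 s.2.1 e, f3 s.2.2.1 e, f4 s.2.2.2 e)) (a, b, c, d)
      = (l.foldl f1 a, l.foldl f2 b, l.foldl f3 c, l.foldl f4 d) := by
  induction l generalizing a b c d with
  | nil => rfl
  | cons x t ih => simp only [List.foldl_cons, ih]

theorem getD_or {α : Type} (a b : Option α) (d : α) : (a.or b).getD d = a.getD (b.getD d) := by
  cases a <;> simp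

theorem foldl_getLastD {α γ : Type} (g : α → List γ) (l : List α) (st : γ) :
    l.foldl (fun s x => (g x).getLastD s) st = (l.flatMap g).getLastD st := by
  induction l generalizing st with
  | nil => rfl
  | cons a t ih =>
    rw [List.foldl_cons, ih]
    simp only [List.flatMap_cons, List.getLastD_eq_getLast?, List.getLast?_append, getD_or]

def jsOf (cs : List Char) : List Int :=
  ((PySem.List.enumerate cs).filter (fun jc => jc.2 == '#')).map (fun jc => jc.1)
def cellsOf (i : Int) (cs : List Char) : List (Int × Int) :=
  ((PySem.List.enumerate cs).filter (fun jc => jc.2 == '#')).map (fun jc => (i, jc.1))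
def caretsOf (i : Int) (cs : List Char) : List (Int × Int) :=
  ((PySem.List.enumerate cs).filter (fun jc => jc.2 == '^')).map (fun jc => (i, jc.1))
def cellsAll (L : List String) : List (Int × Int) :=
  (PySem.List.enumerate L).flatMap (fun il => cellsOf il.1 il.2.toList)
def startsAll (L : List String) : List (Int × Int) :=
  (PySem.List.enumerate L).flatMap (fun il => caretsOf il.1 il.2.toList)
def colOf (L : List String) : PySem.Dict Int (List Int) :=
  (cellsAll L).foldl (fun d ij => d.modify ij.2 [] (fun v => v ++ [ij.1])) PySem.Dict.empty
def rowOf (L : List String) : PySem.Dict Int (List Int) :=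
  (PySem.List.enumerate L).foldl (fun d il =>
    if jsOf il.2.toList ≠ [] then d.insert il.1 (jsOf il.2.toList) else d) PySem.Dict.empty

-- per-line characterisations of A's four component folds
theorem inner_S (i : Int) (ecs : List (Int × Char)) (st : Option (Int × Int)) :
    ecs.foldl (fS i) st
      = (((ecs.filter (fun jc => jc.2 == '^')).map (fun jc => (i, jc.1))).map some).getLastD st := by
  induction ecs generalizing st with
  | nil => rfl
  | cons a t ih =>
    by_cases h : a.2 == '^' <;>
      simp only [List.foldl_cons, fS, h, if_true, if_false, List.filter_cons_of_pos,
        List.filter_cons_of_neg, List.map_cons, List.getLastD_cons, ih, Bool.false_eq_true,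
        not_false_eq_true]

theorem inner_O (i : Int) (ecs : List (Int × Char)) (ob : PySem.Set (Int × Int)) :
    ecs.foldl (fO i) ob
      = ((ecs.filter (fun jc => jc.2 == '#')).map (fun jc => (i, jc.1))).foldl PySem.Set.add ob := by
  induction ecs generalizing ob with
  | nil => rfl
  | cons a t ih =>
    by_cases h : a.2 == '#' <;>
      simp only [List.foldl_cons, fO, h, if_true, if_false, List.filter_cons_of_pos,
        List.filter_cons_of_neg, List.map_cons, ih, Bool.false_eq_true, not_false_eq_true]

theorem inner_C (i : Int) (ecs : List (Int × Char)) (co : PySem.Dict Int (List Int)) :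
    ecs.foldl (fC i) co
      = ((ecs.filter (fun jc => jc.2 == '#')).map (fun jc => (i, jc.1))).foldl
          (fun d ij => d.modify ij.2 [] (fun v => v ++ [ij.1])) co := by
  induction ecs generalizing co with
  | nil => rfl
  | cons a t ih =>
    by_cases h : a.2 == '#' <;>
      simp only [List.foldl_cons, fC, h, if_true, if_false, List.filter_cons_of_pos,
        List.filter_cons_of_neg, List.map_cons, ih, Bool.false_eq_true, not_false_eq_true]

theorem inner_R (i : Int) (ecs : List (Int × Char)) (ro : PySem.Dict Int (List Int)) :
    ecs.foldl (fR i) ro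
      = ((ecs.filter (fun jc => jc.2 == '#')).map (fun jc => jc.1)).foldl
          (fun d j => d.modify i [] (fun v => v ++ [j])) ro := by
  induction ecs generalizing ro with
  | nil => rfl
  | cons a t ih =>
    by_cases h : a.2 == '#' <;>
      simp only [List.foldl_cons, fR, h, if_true, if_false, List.filter_cons_of_pos,
        List.filter_cons_of_neg, List.map_cons, ih, Bool.false_eq_true, not_false_eq_true]

-- START component
theorem startA_eq (L : List String) :
    (PySem.List.enumerate L).foldl (fun st il => (PySem.List.enumerate il.2.toList).foldl (fS il.1) st) none
      = (startsAll L).getLast? := by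
  rw [PySem.List.foldl_congr_mem (PySem.List.enumerate L)
      (fun st il => (PySem.List.enumerate il.2.toList).foldl (fS il.1) st)
      (fun st il => ((caretsOf il.1 il.2.toList).map some).getLastD st) none
      (fun acc x _ => inner_S x.1 (PySem.List.enumerate x.2.toList) acc),
    foldl_getLastD, startsAll, ← List.map_flatMap, List.getLastD_eq_getLast?, List.getLast?_map]
  cases ((PySem.List.enumerate L).flatMap fun il => caretsOf il.1 il.2.toList).getLast? <;> rfl

-- OBSTACLES component
theorem obstA_eq (L : List String) :
    (PySem.List.enumerate L).foldl (fun ob il => (PySem.List.enumerate il.2.toList).foldl (fO il.1) ob) PySem.Set.empty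
      = PySem.Set.ofList (cellsAll L) := by
  rw [PySem.List.foldl_congr_mem (PySem.List.enumerate L)
      (fun ob il => (PySem.List.enumerate il.2.toList).foldl (fO il.1) ob)
      (fun ob il => (cellsOf il.1 il.2.toList).foldl PySem.Set.add ob) PySem.Set.empty
      (fun acc x _ => inner_O x.1 (PySem.List.enumerate x.2.toList) acc),
    ← List.foldl_flatMap]
  rfl

-- COLUMN component (pre-sort)
theorem colA_eq (L : List String) :
    (PySem.List.enumerate L).foldl (fun co il => (PySem.List.enumerate il.2.toList).foldl (fC il.1) co) PySem.Dict.empty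
      = colOf L := by
  rw [PySem.List.foldl_congr_mem (PySem.List.enumerate L)
      (fun co il => (PySem.List.enumerate il.2.toList).foldl (fC il.1) co)
      (fun co il => (cellsOf il.1 il.2.toList).foldl
        (fun d ij => d.modify ij.2 [] (fun v => v ++ [ij.1])) co) PySem.Dict.empty
      (fun acc x _ => inner_C x.1 (PySem.List.enumerate x.2.toList) acc),
    colOf, cellsAll, List.foldl_flatMap]

-- appending one element at a time under a fixed fresh key is a single insert
theorem foldl_modify_fixed_insert (i : Int) (js : List Int) (d : PySem.Dict Int (List Int)) (acc : List Int) :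
    js.foldl (fun d' j => d'.modify i [] (fun v => v ++ [j])) (d.insert i acc)
      = d.insert i (acc ++ js) := by
  induction js generalizing acc with
  | nil => simp
  | cons j t ih =>
    rw [List.foldl_cons, show (d.insert i acc).modify i [] (fun v => v ++ [j])
        = d.insert i (acc ++ [j]) from by
      rw [PySem.Dict.modify, PySem.Dict.getD_insert_self, PySem.Dict.insert_insert_self], ih]
    simp

theorem foldl_modify_fixed (i : Int) (js : List Int) (d : PySem.Dict Int (List Int))
    (h : d.contains i = false) :
    js.foldl (fun d' j => d'.modify i [] (fun v => v ++ [j])) d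
      = if js ≠ [] then d.insert i js else d := by
  cases js with
  | nil => simp
  | cons j t =>
    simp only [ne_eq, reduceCtorEq, not_false_eq_true, if_true, List.foldl_cons]
    rw [show d.modify i [] (fun v => v ++ [j]) = d.insert i ([] ++ [j]) by
      rw [PySem.Dict.modify, PySem.Dict.getD_of_not_contains d [] h],
      foldl_modify_fixed_insert]
    simp

-- ROW component: A's row loop equals B's per-line insert loop
theorem rowA_eq_aux (ps : List (Int × String)) (d : PySem.Dict Int (List Int))
    (hfresh : ∀ il ∈ ps, d.contains il.1 = false)
    (hnd : (ps.map (fun il => il.1)).Nodup) :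
    ps.foldl (fun ro il =>
        (jsOf il.2.toList).foldl (fun d' j => d'.modify il.1 [] (fun v => v ++ [j])) ro) d
      = ps.foldl (fun ro il =>
          if jsOf il.2.toList ≠ [] then ro.insert il.1 (jsOf il.2.toList) else ro) d := by
  induction ps generalizing d with
  | nil => rfl
  | cons a t ih =>
    simp only [List.map_cons, List.nodup_cons] at hnd
    have ha : d.contains a.1 = false := hfresh a (List.mem_cons_self)
    simp only [List.foldl_cons]
    rw [foldl_modify_fixed a.1 _ d ha]
    have hstep : ∀ il ∈ t, (if jsOf a.2.toList ≠ [] then d.insert a.1 (jsOf a.2.toList) else d).contains il.1 = false := by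
      intro il hil
      have h1 : d.contains il.1 = false := hfresh il (List.mem_cons_of_mem _ hil)
      by_cases hj : jsOf a.2.toList ≠ []
      · rw [if_pos hj, PySem.Dict.contains_insert, h1]
        have hne : il.1 ≠ a.1 := by
          intro hc; exact hnd.1 (by rw [← hc]; exact List.mem_map_of_mem hil)
        simp [hne]
      · rw [if_neg hj]; exact h1
    rw [ih _ hstep hnd.2]

theorem rowA_eq (L : List String) :
    (PySem.List.enumerate L).foldl (fun ro il => (PySem.List.enumerate il.2.toList).foldl (fR il.1) ro) PySem.Dict.empty
      = rowOf L := by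
  rw [PySem.List.foldl_congr_mem (PySem.List.enumerate L)
      (fun ro il => (PySem.List.enumerate il.2.toList).foldl (fR il.1) ro)
      (fun ro il =>
        (jsOf il.2.toList).foldl (fun d' j => d'.modify il.1 [] (fun v => v ++ [j])) ro) PySem.Dict.empty
      (fun acc x _ => inner_R x.1 (PySem.List.enumerate x.2.toList) acc),
    rowA_eq_aux]
  · rfl
  · intro il _; rfl
  · have := PySem.List.pairwise_lt_enumerate L 0
    exact List.Pairwise.imp ne_of_lt (List.pairwise_map.mpr this)

theorem pyGet_neg_one {α : Type} (l : List α) (h : l ≠ []) : PySem.List.pyGet? l (-1) = l.getLast? := by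
  have hl : 1 ≤ l.length := List.length_pos_iff.mpr h
  simp only [PySem.List.pyGet?, PySem.List.pyIdx?, List.getLast?_eq_getElem?]
  norm_num
  rw [if_pos hl]
  simp

-- a value-preserving modify at an existing key is the identity
theorem modify_fix_id (d : PySem.Dict Int (List Int)) (k : Int) (g : List Int → List Int)
    (hnd : d.keys.Nodup) (hk : k ∈ d.keys)
    (hv : ∀ v, (k, v) ∈ d.items → g v = v) :
    d.modify k [] g = d := by
  rcases List.mem_map.mp hk with ⟨p, hp, hpk⟩
  have hmem : (k, p.2) ∈ d.items := by rw [← hpk]; exact hp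
  have hgd : d.getD k [] = p.2 := PySem.Dict.getD_of_mem_items d hmem hnd []
  have hcont : d.contains k = true := (PySem.Dict.contains_iff_mem_keys d k).mpr hk
  apply PySem.Dict.ext
  rw [PySem.Dict.modify, hgd, hv p.2 hmem, PySem.Dict.items_insert_of_contains d p.2 hcont]
  apply List.map_congr_left ?_ |>.trans (List.map_id _)
  intro q hq
  by_cases hqk : q.1 == k
  · have h1 : d.get? q.1 = some q.2 := PySem.Dict.get?_of_mem_items d (by exact hq) hnd
    have h2 : d.get? k = some p.2 := PySem.Dict.get?_of_mem_items d hmem hnd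
    have hq1 : q.1 = k := by simpa using hqk
    rw [hq1] at h1
    rw [h2] at h1
    have : p.2 = q.2 := by injection h1
    simp [← hq1, this]
  · simp [hqk]

theorem sortPass_id (d : PySem.Dict Int (List Int)) (hnd : d.keys.Nodup)
    (hs : ∀ p ∈ d.items, PySem.List.sorted p.2 (fun x => x) = p.2) :
    d.keys.foldl (fun d' k => d'.modify k [] (fun v => PySem.List.sorted v (fun x => x) false)) d = d := by
  have main : ∀ ks : List Int, (∀ k ∈ ks, k ∈ d.keys) →
      ks.foldl (fun d' k => d'.modify k [] (fun v => PySem.List.sorted v (fun x => x) false)) d = d := by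
    intro ks hks
    induction ks with
    | nil => rfl
    | cons a t ih =>
      have ha : a ∈ d.keys := hks a List.mem_cons_self
      have hstep : d.modify a [] (fun v => PySem.List.sorted v (fun x => x) false) = d :=
        modify_fix_id d a _ hnd ha (fun v hv => hs (a, v) hv)
      rw [List.foldl_cons, hstep, ih (fun k hk => hks k (List.mem_cons_of_mem _ hk))]
  exact main d.keys (fun k hk => hk)

-- the cells are produced in strictly increasing row-major (lexicographic) order
theorem cells_pairwise (L : List String) :
    (cellsAll L).Pairwise (fun a b => a.1 < b.1 ∨ (a.1 = b.1 ∧ a.2 < b.2)) := by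
  rw [cellsAll, List.pairwise_flatMap]
  constructor
  · intro il _
    rw [cellsOf, List.pairwise_map]
    have h := (PySem.List.pairwise_lt_enumerate il.2.toList 0).filter (fun jc => jc.2 == '#')
    exact h.imp (fun hlt => Or.inr ⟨rfl, hlt⟩)
  · have h := PySem.List.pairwise_lt_enumerate L 0
    refine h.imp ?_
    intro a b hab x hx y hy
    rcases List.mem_map.mp hx with ⟨_, _, rfl⟩
    rcases List.mem_map.mp hy with ⟨_, _, rfl⟩
    exact Or.inl hab

theorem nodup_keys_colOf (L : List String) : (colOf L).keys.Nodup := by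
  exact PySem.Dict.nodup_keys_foldl_modify_key (cellsAll L) (fun ij => ij.2) []
    (fun _ ij => (fun v => v ++ [ij.1])) PySem.Dict.empty (by simp [PySem.Dict.keys, PySem.Dict.empty])

theorem getD_colOf (L : List String) (c : Int) :
    (colOf L).getD c [] = ((cellsAll L).filter (fun ij => ij.2 == c)).map (fun ij => ij.1) := by
  have h0 : colOf L = ((cellsAll L).map (fun ij => (ij.2, ij.1))).foldl
      (fun d p => d.modify p.1 [] (fun v => v ++ [p.2])) PySem.Dict.empty := by
    rw [colOf, List.foldl_map]
  rw [h0, PySem.Dict.getD_foldl_modify_append, List.filter_map, List.map_map]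
  simp [Function.comp_def]

theorem col_values_sorted (L : List String) :
    ∀ p ∈ (colOf L).items, PySem.List.sorted p.2 (fun x => x) = p.2 := by
  intro p hp
  have hv : (colOf L).getD p.1 [] = p.2 :=
    PySem.Dict.getD_of_mem_items (colOf L) (by exact hp) (nodup_keys_colOf L) []
  rw [← hv, getD_colOf]
  apply PySem.List.sorted_eq_self_of_pairwise
  rw [List.pairwise_map]
  have h1 := (cells_pairwise L).filter (fun ij => ij.2 == p.1)
  refine h1.imp_of_mem ?_
  intro a b ha hb hab
  have ha2 : a.2 = p.1 := by simpa using (List.mem_filter.mp ha).2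
  have hb2 : b.2 = p.1 := by simpa using (List.mem_filter.mp hb).2
  rcases hab with h | ⟨_, h⟩
  · exact le_of_lt h
  · omega

theorem items_rowOf (L : List String) :
    (rowOf L).items = ((PySem.List.enumerate L).filter
        (fun il => decide (jsOf il.2.toList ≠ []))).map (fun il => (il.1, jsOf il.2.toList)) := by
  rw [rowOf, PySem.List.foldl_ite_eq_foldl_filter (fun il : Int × String => jsOf il.2.toList ≠ [])
      (fun d il => d.insert il.1 (jsOf il.2.toList)) (PySem.List.enumerate L) PySem.Dict.empty]
  have hnodup : (((PySem.List.enumerate L).filter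
      (fun x => decide (jsOf x.2.toList ≠ []))).map (fun il => il.1)).Nodup := by
    refine (List.Sublist.map _ List.filter_sublist).nodup ?_
    exact List.Pairwise.imp ne_of_lt
      (List.pairwise_map.mpr (PySem.List.pairwise_lt_enumerate L 0))
  exact PySem.Dict.items_foldl_insert_fresh
    ((PySem.List.enumerate L).filter (fun x => decide (jsOf x.2.toList ≠ [])))
    (fun il => il.1) (fun il => jsOf il.2.toList)
    PySem.Dict.empty (fun _ _ => PySem.Dict.contains_empty _) hnodup

theorem nodup_keys_rowOf (L : List String) : (rowOf L).keys.Nodup := by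
  show ((rowOf L).items.map (fun p => p.1)).Nodup
  rw [items_rowOf, List.map_map]
  refine (List.Sublist.map _ List.filter_sublist).nodup ?_
  have := PySem.List.pairwise_lt_enumerate L 0
  exact List.Pairwise.imp ne_of_lt (List.pairwise_map.mpr this)

theorem jsOf_pairwise (cs : List Char) : (jsOf cs).Pairwise (· < ·) := by
  rw [jsOf, List.pairwise_map]
  exact ((PySem.List.pairwise_lt_enumerate cs 0).filter _)

theorem row_values_sorted (L : List String) :
    ∀ p ∈ (rowOf L).items, PySem.List.sorted p.2 (fun x => x) = p.2 := by
  intro p hp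
  rw [items_rowOf] at hp
  rcases List.mem_map.mp hp with ⟨il, _, rfl⟩
  exact PySem.List.sorted_eq_self_of_pairwise _ _ ((jsOf_pairwise il.2.toList).imp le_of_lt)

theorem flatMap_filter_nil {α β : Type} (p : α → Prop) [DecidablePred p] (g : α → List β)
    (l : List α) (h : ∀ x ∈ l, ¬ p x → g x = []) :
    (l.filter (fun x => decide (p x))).flatMap g = l.flatMap g := by
  induction l with
  | nil => rfl
  | cons a t ih =>
    by_cases hp : p a
    · rw [List.filter_cons_of_pos (by simpa using hp), List.flatMap_cons, List.flatMap_cons,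
        ih (fun x hx => h x (List.mem_cons_of_mem _ hx))]
    · rw [List.filter_cons_of_neg (by simpa using hp), List.flatMap_cons,
        h a List.mem_cons_self hp, List.nil_append,
        ih (fun x hx => h x (List.mem_cons_of_mem _ hx))]

theorem cellsOf_eq_map (i : Int) (cs : List Char) :
    (jsOf cs).map (fun j => (i, j)) = cellsOf i cs := by
  rw [jsOf, cellsOf, List.map_map]
  rfl

theorem cells_eq (L : List String) :
    (rowOf L).items.flatMap (fun p => p.2.map (fun j => (p.1, j))) = cellsAll L := by
  rw [items_rowOf, List.flatMap_map, cellsAll]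
  rw [flatMap_filter_nil (fun il : Int × String => jsOf il.2.toList ≠ [])
    (fun il => (jsOf il.2.toList).map (fun j => (il.1, j))) (PySem.List.enumerate L)
    (by intro x _ hx; simp only [not_not] at hx; simp [hx])]
  exact List.flatMap_congr (fun il _ => cellsOf_eq_map il.1 il.2.toList)


theorem startB_eq {α : Type} (l : List α) :
    (if l ≠ [] then PySem.List.pyGet? l (-1) else none) = l.getLast? := by
  by_cases h : l = []
  · simp [h]
  · rw [if_pos h, pyGet_neg_one l h]

-- A's interleaved state fold, split into its four independent components
theorem stateA_split (L : List String) :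
    (PySem.List.enumerate L).foldl (fun s il =>
        (PySem.List.enumerate il.2.toList).foldl (fun t jc =>
          if jc.2 == '#' then
            (t.1, PySem.Set.add t.2.1 (il.1, jc.1),
              PySem.Dict.modify t.2.2.1 jc.1 [] (fun v => v ++ [il.1]),
              PySem.Dict.modify t.2.2.2 il.1 [] (fun v => v ++ [jc.1]))
          else if jc.2 == '^' then (some (il.1, jc.1), t.2) else t) s)
      ((none, PySem.Set.empty, PySem.Dict.empty, PySem.Dict.empty) :
        Option (Int × Int) × PySem.Set (Int × Int) × PySem.Dict Int (List Int) × PySem.Dict Int (List Int))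
      = ((startsAll L).getLast?, PySem.Set.ofList (cellsAll L), colOf L, rowOf L) := by
  rw [PySem.List.foldl_congr_mem (PySem.List.enumerate L)
      _
      (fun s il => ((PySem.List.enumerate il.2.toList).foldl (fS il.1) s.1,
        (PySem.List.enumerate il.2.toList).foldl (fO il.1) s.2.1,
        (PySem.List.enumerate il.2.toList).foldl (fC il.1) s.2.2.1,
        (PySem.List.enumerate il.2.toList).foldl (fR il.1) s.2.2.2))
      (none, PySem.Set.empty, PySem.Dict.empty, PySem.Dict.empty)
      (fun acc x _ => inner_split x.1 (PySem.List.enumerate x.2.toList) acc),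
    foldl_prod4 (fun (x : Option (Int × Int)) (il : Int × String) => (PySem.List.enumerate il.2.toList).foldl (fS il.1) x)
      (fun (x : PySem.Set (Int × Int)) (il : Int × String) => (PySem.List.enumerate il.2.toList).foldl (fO il.1) x)
      (fun (x : PySem.Dict Int (List Int)) (il : Int × String) => (PySem.List.enumerate il.2.toList).foldl (fC il.1) x)
      (fun (x : PySem.Dict Int (List Int)) (il : Int × String) => (PySem.List.enumerate il.2.toList).foldl (fR il.1) x),
    startA_eq, obstA_eq, colA_eq, rowA_eq]

-- ===== VERDICT (by name: the statement is the Claim_ definition above) =====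
theorem parse_spec : Claim_equal_parse := by
  unfold Claim_equal_parse
  intro data _ hpre
  unfold Spec_parse
  have hne := pv_splitlines_ne_nil data hpre
  cases hsp : PySem.Str.splitlines data with
  | nil => exact absurd hsp hne
  | cons l0 rest =>
    simp only [parse, parse_alt, hsp]
    rw [stateA_split (l0 :: rest)]
    simp only [Prod.mk.injEq]
    refine ⟨?_, trivial, ?_, ?_, ?_⟩
    · exact (startB_eq (startsAll (l0 :: rest))).symm
    · exact congrArg PySem.Set.ofList (cells_eq (l0 :: rest)).symm
    · rw [sortPass_id (colOf (l0 :: rest)) (nodup_keys_colOf _) (col_values_sorted _)]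
      exact congrArg
        (fun l => (List.foldl (fun d (ij : Int × Int) => d.modify ij.2 [] (fun v => v ++ [ij.1]))
          PySem.Dict.empty l).items) (cells_eq (l0 :: rest)).symm
    · rw [sortPass_id (rowOf (l0 :: rest)) (nodup_keys_rowOf _) (row_values_sorted _)]
      rfl
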